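-- pv_equiv track=rewrite | github.com/livekit/livekit_composite | summarize_changes.py | detect_large_added_dirs
-- ===== SOURCE A (Python) =====
-- import collections
--
-- def detect_large_added_dirs(changed_files, threshold=200):
--     """Detect large new top-level directories that were added in this commit/range."""
--     # Only consider added files
--     added_files = [f for f in changed_files if f and not f.startswith('..')]
--
--     # Count files by directory path (up to 3 levels deep)
--     dir_counts = collections.defaultdict(list)
--     for f in added_files:
--         parts = f.split('/')
--         if len(parts) >= 2:
--             # Check different levels: level 1, level 2, level 3
--             for depth in range(1, min(4, len(parts))):
--                 dir_path = '/'.join(parts[:depth])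
--                 dir_counts[dir_path].append(f)
--
--     # Find directories with more than threshold files
--     large_dirs = {}
--     for dir_path, files in dir_counts.items():
--         if len(files) >= threshold:
--             # Check if this is the most specific (deepest) directory that meets the threshold
--             is_most_specific = True
--             for other_path, other_files in dir_counts.items():
--                 if (other_path != dir_path and
--                     other_path.startswith(dir_path + '/') and
--                     len(other_files) >= threshold):
--                     is_most_specific = False
--                     break
--
--             if is_most_specific:
--                 large_dirs[dir_path] = files
--
--     # Prefer parent directories when possible
--     # If we have both livekit/llama.cpp/ and livekit/llama.cpp/ggml/, prefer livekit/llama.cpp/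
--     preferred_dirs = {}
--     for dir_path, files in large_dirs.items():
--         # Check if this directory is a parent of another large directory
--         is_parent = False
--         for other_path in large_dirs.keys():
--             if other_path != dir_path and other_path.startswith(dir_path + '/'):
--                 # This is a parent directory, prefer it
--                 is_parent = True
--                 break
--
--         if is_parent:
--             # Use this parent directory instead of its children
--             preferred_dirs[dir_path] = files
--         else:
--             # Check if this directory is a child of an already selected parent
--             is_child_of_selected = False
--             for parent_path in preferred_dirs.keys():
--                 if dir_path.startswith(parent_path + '/'):
--                     is_child_of_selected = True
--                     break
--
--             if not is_child_of_selected: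
--                 preferred_dirs[dir_path] = files
--
--     return preferred_dirs
-- ===== SOURCE B (Python) =====
-- def detect_large_added_dirs(changed_files, threshold=200):
--     """Detect large new top-level directories that were added in this commit/range."""
--     # One pass: group files under their directory prefixes (up to 3 levels deep)
--     dir_files = {}
--     for f in changed_files:
--         if not f or f.startswith('..'):
--             continue
--         parts = f.split('/')
--         if len(parts) < 2:
--             continue
--         for depth in range(1, min(4, len(parts))):
--             dir_files.setdefault('/'.join(parts[:depth]), []).append(f)
--     # Large directories, then mark every proper ancestor of a large directory:
--     # an ancestor of a large directory is never "most specific", so it is dropped.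
--     large = [d for d, fs in dir_files.items() if len(fs) >= threshold]
--     shadowed = set()
--     for d in large:
--         parts = d.split('/')
--         for depth in range(1, len(parts)):
--             shadowed.add('/'.join(parts[:depth]))
--     return {d: dir_files[d] for d in large if d not in shadowed}
-- ===== Notes on version B (the rewrite author's own statement) =====
-- stated objective: alternative
-- what changed: A rescans all directory entries for every large-directory candidate and runs a third (dead) 'preferred parents' pass; B groups files once, marks every proper ancestor of a large directory in one pass over the large directories, and emits the unmarked large directories in insertion order.
import Mathlib
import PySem

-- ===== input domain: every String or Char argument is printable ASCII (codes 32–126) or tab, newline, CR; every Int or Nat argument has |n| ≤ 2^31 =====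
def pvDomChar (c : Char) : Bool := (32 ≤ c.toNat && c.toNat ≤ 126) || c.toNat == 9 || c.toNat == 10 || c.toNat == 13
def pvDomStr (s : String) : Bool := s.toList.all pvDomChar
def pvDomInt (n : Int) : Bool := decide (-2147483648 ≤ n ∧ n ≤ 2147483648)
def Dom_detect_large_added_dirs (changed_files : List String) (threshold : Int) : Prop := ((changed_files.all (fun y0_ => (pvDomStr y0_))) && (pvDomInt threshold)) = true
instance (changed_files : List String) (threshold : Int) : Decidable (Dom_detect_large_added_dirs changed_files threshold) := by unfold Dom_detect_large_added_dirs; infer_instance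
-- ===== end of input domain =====

-- B replaces A's repeated rescans of the directory table (and A's dead third "preferred parents"
-- pass) by a single ancestor-marking pass over the grouped directories; same return value everywhere.

-- ===== PORT A =====
-- A-side helpers: f.split('/') (sep "/" is nonempty, so split? never returns none)
def pvA_parts (f : String) : List String := (PySem.Str.split? f "/").getD []
-- the body of A's "for f in added_files" grouping loop
def pvA_addDirs (dc : PySem.Dict String (List String)) (f : String) : PySem.Dict String (List String) :=
  let parts := pvA_parts f
  if 2 ≤ parts.length then
    (PySem.List.pyRange 1 (min 4 (parts.length : Int))).foldl
      (fun dc depth =>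
        let dir_path := PySem.Str.join "/" (PySem.List.slice parts none (some depth))
        dc.modify dir_path [] (fun fs => fs ++ [f])) dc
  else dc

def detect_large_added_dirs (changed_files : List String) (threshold : Int) : List (String × List String) :=
  let added_files := changed_files.filter (fun f => !(f == "") && !(PySem.Str.startswith f ".."))
  let dir_counts := added_files.foldl pvA_addDirs PySem.Dict.empty
  let large_dirs := dir_counts.items.foldl (fun ld p =>
      if threshold ≤ (p.2.length : Int) then
        let is_most_specific := !(dir_counts.items.any (fun o =>
            !(o.1 == p.1) && PySem.Str.startswith o.1 (p.1 ++ "/") &&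
              decide (threshold ≤ (o.2.length : Int))))
        if is_most_specific then ld.insert p.1 p.2 else ld
      else ld) PySem.Dict.empty
  let preferred_dirs := large_dirs.items.foldl (fun pd p =>
      let is_parent := large_dirs.items.any (fun o =>
          !(o.1 == p.1) && PySem.Str.startswith o.1 (p.1 ++ "/"))
      if is_parent then pd.insert p.1 p.2
      else
        let is_child_of_selected := pd.items.any (fun q => PySem.Str.startswith p.1 (q.1 ++ "/"))
        if is_child_of_selected then pd else pd.insert p.1 p.2) PySem.Dict.empty
  preferred_dirs.items

-- ===== PORT B =====
-- B-side helper: the body of B's single grouping loop (the two 'continue's become else-branches);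
-- Python's dir_files.setdefault(p, []).append(f) is exactly Dict.modify p [] (· ++ [f])
def pvB_group (d : PySem.Dict String (List String)) (f : String) : PySem.Dict String (List String) :=
  if f == "" || PySem.Str.startswith f ".." then d
  else
    let parts := (PySem.Str.split? f "/").getD []   -- f.split('/')
    if parts.length < 2 then d
    else
      (PySem.List.pyRange 1 (min 4 (parts.length : Int))).foldl
        (fun d depth => d.modify (PySem.Str.join "/" (PySem.List.slice parts none (some depth))) [] (fun fs => fs ++ [f])) d

def detect_large_added_dirs_alt (changed_files : List String) (threshold : Int) : List (String × List String) :=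
  let dir_files := changed_files.foldl pvB_group PySem.Dict.empty
  let large := (dir_files.items.filter (fun p => decide (threshold ≤ (p.2.length : Int)))).map (fun p => p.1)
  let shadowed := large.foldl (fun s d =>
      let parts := (PySem.Str.split? d "/").getD []   -- d.split('/')
      (PySem.List.pyRange 1 (parts.length : Int)).foldl
        (fun s depth => PySem.Set.add s (PySem.Str.join "/" (PySem.List.slice parts none (some depth)))) s)
    PySem.Set.empty
  -- Python's dir_files[d]: d is always a key of dir_files here, so it equals getD d []
  ((large.filter (fun d => !(PySem.Set.contains shadowed d))).foldl
      (fun out d => out.insert d (dir_files.getD d [])) PySem.Dict.empty).items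

-- ===== PRECONDITION & SPEC =====
def Spec_detect_large_added_dirs (changed_files : List String) (threshold : Int) (out : List (String × List String)) : Prop := out = detect_large_added_dirs_alt changed_files threshold
instance (changed_files : List String) (threshold : Int) (out : List (String × List String)) : Decidable (Spec_detect_large_added_dirs changed_files threshold out) := by unfold Spec_detect_large_added_dirs; infer_instance

-- ===== CLAIM (what is proved, stated in full; the proofs are below) =====
def Claim_equal_detect_large_added_dirs : Prop := ∀ (changed_files : List String) (threshold : Int), Dom_detect_large_added_dirs changed_files threshold → Spec_detect_large_added_dirs changed_files threshold (detect_large_added_dirs changed_files threshold)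

-- ===== LEMMAS AND PROOFS =====

-- ---- foundation: Python's '/'-split as a structural function ----

def pvSplit (pre : List Char) : List Char → List (List Char)
  | [] => [pre]
  | c :: rest => if c = '/' then pre :: pvSplit [] rest else pvSplit (pre ++ [c]) rest

lemma pvGo_eq_pvSplit (l : List Char) : ∀ (fuel : Nat) (cur : List Char) (acc : List (List Char)),
    l.length < fuel →
    PySem.Chars.splitOn.go ['/'] fuel l cur acc = acc.reverse ++ pvSplit cur.reverse l := by
  induction l with
  | nil =>
    intro fuel cur acc h
    match fuel with
    | fuel + 1 => rw [PySem.Chars.splitOn.go.eq_def]; simp [pvSplit]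
  | cons c rest ih =>
    intro fuel cur acc h
    match fuel with
    | fuel + 1 =>
      rw [PySem.Chars.splitOn.go.eq_def]
      by_cases hc : c = '/'
      · subst hc
        simp only [List.isPrefixOf, List.drop_succ_cons, List.drop_zero, if_pos, beq_self_eq_true,
          Bool.true_and, List.isPrefixOf_nil_left, if_true]
        rw [show List.drop (['/'] : List Char).length ('/' :: rest) = rest from by simp]
        rw [ih fuel [] (cur.reverse :: acc) (by simpa using h)]
        simp [pvSplit]
      · have hpf : (['/'].isPrefixOf (c :: rest)) = false := by
          simp only [List.isPrefixOf, List.isPrefixOf_nil_left, Bool.and_true]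
          exact beq_eq_false_iff_ne.mpr (fun h' => hc h'.symm)
        simp only [hpf, Bool.false_eq_true, if_false]
        rw [ih fuel (c :: cur) acc (by simpa using Nat.lt_of_succ_lt_succ h)]
        simp [pvSplit, hc]

lemma pvSplitOn_eq (s : List Char) : PySem.Chars.splitOn s ['/'] = pvSplit [] s := by
  unfold PySem.Chars.splitOn
  rw [pvGo_eq_pvSplit s (s.length + 1) [] [] (Nat.lt_succ_self _)]
  simp

lemma pvSplit_no_slash {q : List Char} (hq : '/' ∉ q) : ∀ pre, pvSplit pre q = [pre ++ q] := by
  induction q with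
  | nil => intro pre; simp [pvSplit]
  | cons c rest ih =>
    intro pre
    have hc : c ≠ '/' := fun h => hq (h ▸ List.mem_cons_self ..)
    simp only [pvSplit, if_neg hc]
    rw [ih (fun h => hq (List.mem_cons_of_mem _ h))]
    simp

lemma pvSplit_append_slash {q : List Char} (hq : '/' ∉ q) (b : List Char) :
    ∀ pre, pvSplit pre (q ++ '/' :: b) = (pre ++ q) :: pvSplit [] b := by
  induction q with
  | nil => intro pre; simp [pvSplit]
  | cons c rest ih =>
    intro pre
    have hc : c ≠ '/' := fun h => hq (h ▸ List.mem_cons_self ..)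
    simp only [List.cons_append, pvSplit, if_neg hc]
    rw [ih (fun h => hq (List.mem_cons_of_mem _ h))]
    simp

lemma mem_pvSplit_no_slash : ∀ (l pre : List Char), '/' ∉ pre →
    ∀ x ∈ pvSplit pre l, '/' ∉ x := by
  intro l
  induction l with
  | nil => intro pre hpre x hx; simp [pvSplit] at hx; subst hx; exact hpre
  | cons c rest ih =>
    intro pre hpre x hx
    simp only [pvSplit] at hx
    by_cases hc : c = '/'
    · rw [if_pos hc] at hx
      rcases List.mem_cons.mp hx with h | hx
      · exact h ▸ hpre
      · exact ih [] (by simp) x hx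
    · rw [if_neg hc] at hx
      refine ih (pre ++ [c]) ?_ x hx
      intro hm
      rcases List.mem_append.mp hm with h | h
      · exact hpre h
      · exact hc (List.mem_singleton.mp h).symm

lemma pvJoin_cons (q : List Char) (rest : List (List Char)) (h : rest ≠ []) :
    PySem.Chars.join ['/'] (q :: rest) = q ++ '/' :: PySem.Chars.join ['/'] rest := by
  obtain ⟨r, rs, rfl⟩ := List.exists_cons_of_ne_nil h
  rw [PySem.Chars.join_cons_cons]
  simp

lemma pvSplit_join : ∀ (cs : List (List Char)), cs ≠ [] → (∀ x ∈ cs, '/' ∉ x) →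
    pvSplit [] (PySem.Chars.join ['/'] cs) = cs := by
  intro cs
  induction cs with
  | nil => intro h; exact absurd rfl h
  | cons q rest ih =>
    intro _ hfree
    match rest, ih with
    | [], _ =>
      rw [PySem.Chars.join_singleton]
      rw [pvSplit_no_slash (hfree q (by simp)) []]
      simp
    | r :: rs, ih =>
      rw [pvJoin_cons q (r :: rs) (by simp)]
      rw [pvSplit_append_slash (hfree q (by simp)) _ []]
      rw [ih (by simp) (fun x hx => hfree x (List.mem_cons_of_mem _ hx))]
      simp

lemma pvJoin_append (as bs : List (List Char)) (ha : as ≠ []) (hb : bs ≠ []) :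
    PySem.Chars.join ['/'] (as ++ bs) =
      PySem.Chars.join ['/'] as ++ '/' :: PySem.Chars.join ['/'] bs := by
  induction as with
  | nil => exact absurd rfl ha
  | cons a as' ih =>
    match as' with
    | [] =>
      simp only [List.cons_append, List.nil_append]
      rw [pvJoin_cons a bs hb, PySem.Chars.join_singleton]
    | a' :: rest =>
      rw [List.cons_append, pvJoin_cons a ((a' :: rest) ++ bs) (by simp),
        pvJoin_cons a (a' :: rest) (by simp), ih (by simp)]
      simp

-- every '/' in a join of slash-free pieces is a separator
lemma pvSlash_sep : ∀ (q : List Char), '/' ∉ q → ∀ (p t u : List Char),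
    p ++ '/' :: t = q ++ '/' :: u →
    (p = q ∧ t = u) ∨ (∃ p', p = q ++ '/' :: p' ∧ p' ++ '/' :: t = u) := by
  intro q
  induction q with
  | nil =>
    intro _ p t u h
    match p with
    | [] => left; simpa using h
    | c :: p' =>
      right
      simp only [List.nil_append, List.cons_append, List.cons.injEq] at h
      exact ⟨p', by simp [h.1], by simp [h.2]⟩
  | cons c q' ih =>
    intro hq p t u h
    have hc : c ≠ '/' := fun hcc => hq (hcc ▸ List.mem_cons_self ..)
    match p with
    | [] =>
      exfalso
      simp only [List.nil_append, List.cons_append, List.cons.injEq] at h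
      exact hc h.1.symm
    | d :: p' =>
      simp only [List.cons_append, List.cons.injEq] at h
      obtain ⟨rfl, h2⟩ := h
      rcases ih (fun hm => hq (List.mem_cons_of_mem _ hm)) p' t u h2 with ⟨rfl, rfl⟩ | ⟨p'', rfl, hu⟩
      · left; exact ⟨rfl, rfl⟩
      · right; exact ⟨p'', rfl, hu⟩

lemma pvPrefix_join : ∀ (qs : List (List Char)), qs ≠ [] → (∀ x ∈ qs, '/' ∉ x) →
    ∀ p : List Char, (p ++ ['/']) <+: PySem.Chars.join ['/'] qs →
    ∃ j, 1 ≤ j ∧ j < qs.length ∧ p = PySem.Chars.join ['/'] (qs.take j) := by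
  intro qs
  induction qs with
  | nil => intro h; exact absurd rfl h
  | cons q tail ih =>
    intro _ hfree p hpre
    match tail, ih with
    | [], _ =>
      exfalso
      rw [PySem.Chars.join_singleton] at hpre
      exact hfree q (by simp) (hpre.subset (by simp))
    | q' :: rest, ih =>
      rw [pvJoin_cons q (q' :: rest) (by simp)] at hpre
      obtain ⟨u, hu⟩ := hpre
      rw [List.append_assoc] at hu
      simp only [List.singleton_append] at hu
      rcases pvSlash_sep q (hfree q (by simp)) p u _ hu with ⟨rfl, _⟩ | ⟨p', rfl, hrest⟩
      · exact ⟨1, le_refl _, by simp, by simp [PySem.Chars.join_singleton]⟩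
      · have hpre' : (p' ++ ['/']) <+: PySem.Chars.join ['/'] (q' :: rest) :=
          ⟨u, by rw [← hrest]; simp⟩
        obtain ⟨j, hj1, hjlt, hjeq⟩ := ih (by simp) (fun x hx => hfree x (List.mem_cons_of_mem _ hx)) p' hpre'
        refine ⟨j + 1, by omega, by simpa using Nat.succ_lt_succ hjlt, ?_⟩
        rw [List.take_succ_cons, pvJoin_cons q _ ?_, hjeq]
        intro htake
        have := congrArg List.length htake
        simp at this
        omega


-- ---- string bridges ----

lemma pvToList_slash : ("/" : String).toList = ['/'] := by decide

lemma pvParts_eq (f : String) : pvA_parts f = (pvSplit [] f.toList).map String.ofList := by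
  simp [pvA_parts, PySem.Str.split?, PySem.Chars.split?, pvToList_slash, pvSplitOn_eq]

lemma pvToList_join (parts : List String) :
    (PySem.Str.join "/" parts).toList = PySem.Chars.join ['/'] (parts.map String.toList) := by
  simp [PySem.Str.join, pvToList_slash]

lemma pvSw_iff (a b : String) : PySem.Str.startswith a (b ++ "/") = true ↔ (b.toList ++ ['/']) <+: a.toList := by
  rw [PySem.Str.startswith, PySem.Chars.startswith_iff]
  simp [pvToList_slash]

-- ---- good keys: every key of the grouping dict is a '/'-join of nonempty slash-free pieces ----

def pvGood (k : String) : Prop :=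
  ∃ cs : List (List Char), cs ≠ [] ∧ (∀ x ∈ cs, '/' ∉ x) ∧ k.toList = PySem.Chars.join ['/'] cs

lemma pvGoodParts {k : String} (h : pvGood k) :
    ∃ cs, cs ≠ [] ∧ (∀ x ∈ cs, '/' ∉ x) ∧ k.toList = PySem.Chars.join ['/'] cs ∧
      pvA_parts k = cs.map String.ofList := by
  obtain ⟨cs, h1, h2, h3⟩ := h
  exact ⟨cs, h1, h2, h3, by rw [pvParts_eq, h3, pvSplit_join cs h1 h2]⟩

lemma pvGood_key {f : String} (h2 : 2 ≤ (pvA_parts f).length) {dep : Int}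
    (hdep : dep ∈ PySem.List.pyRange 1 (min 4 ((pvA_parts f).length : Int))) :
    pvGood (PySem.Str.join "/" (PySem.List.slice (pvA_parts f) none (some dep))) := by
  obtain ⟨hdep1, hdep2⟩ := PySem.List.mem_pyRange_one.mp hdep
  have hdlen : dep < ((pvA_parts f).length : Int) := lt_of_lt_of_le hdep2 (min_le_right _ _)
  have h0 : (0:Int) ≤ dep := by omega
  have hn1 : 1 ≤ dep.toNat := by omega
  have hn2 : dep.toNat < (pvA_parts f).length := by omega
  rw [PySem.List.slice_to _ h0]
  have hlen : (pvSplit [] f.toList).length = (pvA_parts f).length := by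
    rw [pvParts_eq]; simp
  refine ⟨(pvSplit [] f.toList).take dep.toNat, ?_, ?_, ?_⟩
  · apply List.ne_nil_of_length_pos
    rw [List.length_take]
    omega
  · intro x hx; exact mem_pvSplit_no_slash _ [] (by simp) x (List.mem_of_mem_take hx)
  · rw [pvToList_join, pvParts_eq, ← List.map_take]
    rw [List.map_map, show (String.toList ∘ String.ofList) = id from funext (fun l => by simp)]
    simp

-- ---- the grouping dict: nodup keys, all keys good ----

def pvP (dc : PySem.Dict String (List String)) : Prop :=
  dc.keys.Nodup ∧ ∀ k ∈ dc.keys, pvGood k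

lemma pvP_modify {dc : PySem.Dict String (List String)} (h : pvP dc) {k : String}
    (hk : pvGood k) (g : List String → List String) : pvP (dc.modify k [] g) := by
  obtain ⟨hnd, hgood⟩ := h
  have hkeys := PySem.Dict.keys_modify dc k [] g
  cases hcon : dc.contains k with
  | true =>
    rw [PySem.Dict.keys_insert_of_contains dc _ hcon] at hkeys
    exact ⟨hkeys ▸ hnd, hkeys ▸ hgood⟩
  | false =>
    rw [PySem.Dict.keys_insert_of_not_contains dc _ hcon] at hkeys
    have hnm : k ∉ dc.keys := by
      rw [← PySem.Dict.contains_iff_mem_keys, hcon]; simp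
    constructor
    · rw [hkeys]
      simp only [List.nodup_append, List.nodup_singleton, true_and, hnd]
      intro a ha b hb he
      subst he
      exact hnm ((List.mem_singleton.mp hb) ▸ ha)
    · intro k' hk'
      rw [hkeys] at hk'
      rcases List.mem_append.mp hk' with h | h
      · exact hgood k' h
      · rw [List.mem_singleton.mp h]; exact hk

lemma pvP_foldl_modify {β : Type} (l : List β) (key : β → String) (g : β → List String → List String) :
    ∀ dc, pvP dc → (∀ b ∈ l, pvGood (key b)) →
    pvP (l.foldl (fun dc b => dc.modify (key b) [] (g b)) dc) := by
  induction l with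
  | nil => intro dc h _; exact h
  | cons b rest ih =>
    intro dc h hg
    rw [List.foldl_cons]
    exact ih _ (pvP_modify h (hg b (by simp)) (g b)) (fun b' hb' => hg b' (List.mem_cons_of_mem _ hb'))

lemma pvP_addDirs {dc : PySem.Dict String (List String)} (h : pvP dc) (f : String) :
    pvP (pvA_addDirs dc f) := by
  simp only [pvA_addDirs]
  by_cases h2 : 2 ≤ (pvA_parts f).length
  · rw [if_pos h2]
    have := pvP_foldl_modify (PySem.List.pyRange 1 (min 4 ((pvA_parts f).length : Int)))
      (fun dep => PySem.Str.join "/" (PySem.List.slice (pvA_parts f) none (some dep)))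
      (fun _ fs => fs ++ [f]) dc h (fun dep hdep => pvGood_key h2 hdep)
    simpa using this
  · rw [if_neg h2]; exact h

def pvBuild (l : List String) : PySem.Dict String (List String) :=
  (l.filter (fun f => !(f == "") && !(PySem.Str.startswith f ".."))).foldl pvA_addDirs PySem.Dict.empty

lemma pvBuild_P (l : List String) : pvP (pvBuild l) := by
  unfold pvBuild
  generalize l.filter _ = m
  have : ∀ (m : List String) (dc : PySem.Dict String (List String)), pvP dc → pvP (m.foldl pvA_addDirs dc) := by
    intro m
    induction m with
    | nil => intro dc h; exact h
    | cons f rest ih => intro dc h; rw [List.foldl_cons]; exact ih _ (pvP_addDirs h f)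
  exact this m PySem.Dict.empty ⟨by simp [PySem.Dict.keys_empty], by simp [PySem.Dict.keys_empty]⟩

-- B's grouping loop builds the same dict as A's filter-then-group loop
lemma pvBuildB_eq (l : List String) : l.foldl pvB_group PySem.Dict.empty = pvBuild l := by
  unfold pvBuild
  rw [← PySem.List.foldl_if_eq_foldl_filter (fun f => !(f == "") && !(PySem.Str.startswith f "..")) pvA_addDirs]
  congr 1
  funext dc f
  by_cases hskip : (f == "" || PySem.Str.startswith f "..") = true
  · have hk : (!(f == "") && !(PySem.Str.startswith f "..")) = false := by
      cases hb : (f == "") <;> cases hs : PySem.Str.startswith f ".." <;> simp_all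
    simp only [pvB_group, hskip, if_true, hk, Bool.false_eq_true, if_false]
  · have hor : (f == "" || PySem.Str.startswith f "..") = false := by
      simpa using hskip
    have hk : (!(f == "") && !(PySem.Str.startswith f "..")) = true := by
      cases hb : (f == "") <;> cases hs : PySem.Str.startswith f ".." <;> simp_all
    simp only [pvB_group, hor, Bool.false_eq_true, if_false, hk, if_true, pvA_addDirs, pvA_parts]
    by_cases hl : ((PySem.Str.split? f "/").getD []).length < 2
    · rw [if_pos hl, if_neg (by omega)]
    · rw [if_neg hl, if_pos (by omega)]


-- ---- A's inner "most specific" scan, as a predicate ----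

def pvAnyDesc (L : List (String × List String)) (t : Int) (k : String) : Bool :=
  L.any (fun o => !(o.1 == k) && PySem.Str.startswith o.1 (k ++ "/") && decide (t ≤ (o.2.length : Int)))

-- ---- B's shadowed set ----

def pvShadow (D : PySem.Dict String (List String)) (t : Int) : PySem.Set String :=
  ((D.items.filter (fun p => decide (t ≤ (p.2.length : Int)))).map (fun p => p.1)).foldl
    (fun s d =>
      let parts := (PySem.Str.split? d "/").getD []
      (PySem.List.pyRange 1 (parts.length : Int)).foldl
        (fun s depth => PySem.Set.add s (PySem.Str.join "/" (PySem.List.slice parts none (some depth)))) s)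
    PySem.Set.empty

lemma pvMem_double_foldl_add {β : Type} (l : List β) (g : β → List Int) (h : β → Int → String) :
    ∀ (s0 : PySem.Set String) (y : String),
    (y ∈ l.foldl (fun s d => (g d).foldl (fun s e => PySem.Set.add s (h d e)) s) s0) ↔
      y ∈ s0 ∨ ∃ d ∈ l, ∃ e ∈ g d, y = h d e := by
  induction l with
  | nil => intro s0 y; simp
  | cons d rest ih =>
    intro s0 y
    rw [List.foldl_cons, ih, PySem.Set.mem_foldl_add]
    constructor
    · rintro ((hs | ⟨e, he, rfl⟩) | ⟨d', hd', e, he, rfl⟩)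
      · exact Or.inl hs
      · exact Or.inr ⟨d, by simp, e, he, rfl⟩
      · exact Or.inr ⟨d', List.mem_cons_of_mem _ hd', e, he, rfl⟩
    · rintro (hs | ⟨d', hd', e, he, rfl⟩)
      · exact Or.inl (Or.inl hs)
      · rcases List.mem_cons.mp hd' with rfl | hd'
        · exact Or.inl (Or.inr ⟨e, he, rfl⟩)
        · exact Or.inr ⟨d', hd', e, he, rfl⟩

lemma pvMem_shadow (D : PySem.Dict String (List String)) (t : Int) (y : String) :
    y ∈ pvShadow D t ↔
      ∃ p ∈ D.items, t ≤ ((p.2 : List String).length : Int) ∧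
        ∃ dep ∈ PySem.List.pyRange 1 ((pvA_parts p.1).length : Int),
          y = PySem.Str.join "/" (PySem.List.slice (pvA_parts p.1) none (some dep)) := by
  simp only [pvShadow]
  rw [pvMem_double_foldl_add
      ((D.items.filter (fun p => decide (t ≤ (p.2.length : Int)))).map (fun p => p.1))
      (fun d => PySem.List.pyRange 1 (((PySem.Str.split? d "/").getD []).length : Int))
      (fun d e => PySem.Str.join "/" (PySem.List.slice ((PySem.Str.split? d "/").getD []) none (some e)))]
  rw [PySem.Set.empty_eq]
  simp only [List.not_mem_nil, false_or, List.mem_map, List.mem_filter]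
  constructor
  · rintro ⟨d, ⟨p, ⟨hp, hbig⟩, rfl⟩, e, he, rfl⟩
    exact ⟨p, hp, of_decide_eq_true hbig, e, by simpa [pvA_parts] using he, by simp [pvA_parts]⟩
  · rintro ⟨p, hp, hbig, e, he, rfl⟩
    exact ⟨p.1, ⟨p, ⟨hp, decide_eq_true hbig⟩, rfl⟩, e, by simpa [pvA_parts] using he,
      by simp [pvA_parts]⟩

-- ---- the heart: A's quadratic descendant scan agrees with membership in B's shadowed set ----

lemma pvAnyDesc_eq_shadow (D : PySem.Dict String (List String)) (t : Int)
    (hgood : ∀ k ∈ D.keys, pvGood k) (x : String) :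
    pvAnyDesc D.items t x = (pvShadow D t).contains x := by
  have hfwd : pvAnyDesc D.items t x = true → (pvShadow D t).contains x = true := by
    intro ha
    obtain ⟨o, ho, hcond⟩ := List.any_eq_true.mp ha
    rw [Bool.and_eq_true, Bool.and_eq_true] at hcond
    obtain ⟨⟨hbne, hbsw⟩, hbdec⟩ := hcond
    obtain ⟨cs, hcs0, hcsfree, hcsj, hcsparts⟩ :=
      pvGoodParts (hgood o.1 (PySem.Dict.mem_keys_of_mem_items D ho))
    have hpre : (x.toList ++ ['/']) <+: PySem.Chars.join ['/'] cs := by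
      rw [← hcsj]; exact (pvSw_iff o.1 x).mp hbsw
    obtain ⟨j, hj1, hjlt, hjeq⟩ := pvPrefix_join cs hcs0 hcsfree x.toList hpre
    rw [PySem.Set.contains_iff, pvMem_shadow]
    refine ⟨o, ho, of_decide_eq_true hbdec, (j : Int), ?_, ?_⟩
    · rw [hcsparts, PySem.List.mem_pyRange_one]
      simp only [List.length_map]
      constructor
      · exact_mod_cast hj1
      · exact_mod_cast hjlt
    · apply String.toList_inj.mp
      rw [hcsparts, PySem.List.slice_to _ (by positivity), pvToList_join]
      rw [Int.toNat_natCast, ← List.map_take, List.map_map,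
        show (String.toList ∘ String.ofList) = id from funext (fun l => by simp), List.map_id]
      exact hjeq
  have hbwd : (pvShadow D t).contains x = true → pvAnyDesc D.items t x = true := by
    intro hb
    rw [PySem.Set.contains_iff, pvMem_shadow] at hb
    obtain ⟨p, hp, hbig, dep, hdep, hy⟩ := hb
    obtain ⟨cs, hcs0, hcsfree, hcsj, hcsparts⟩ :=
      pvGoodParts (hgood p.1 (PySem.Dict.mem_keys_of_mem_items D hp))
    rw [hcsparts] at hdep hy
    rw [PySem.List.mem_pyRange_one] at hdep
    simp only [List.length_map] at hdep
    have hd0 : (0:Int) ≤ dep := by omega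
    have hn1 : 1 ≤ dep.toNat := by omega
    have hn2 : dep.toNat < cs.length := by omega
    have htake : x.toList = PySem.Chars.join ['/'] (cs.take dep.toNat) := by
      rw [hy, PySem.List.slice_to _ hd0, pvToList_join, ← List.map_take, List.map_map,
        show (String.toList ∘ String.ofList) = id from funext (fun l => by simp), List.map_id]
    have hne1 : cs.take dep.toNat ≠ [] := by
      apply List.ne_nil_of_length_pos; rw [List.length_take]; omega
    have hne2 : cs.drop dep.toNat ≠ [] := by
      apply List.ne_nil_of_length_pos; rw [List.length_drop]; omega
    have hsplit : PySem.Chars.join ['/'] cs = x.toList ++ '/' :: PySem.Chars.join ['/'] (cs.drop dep.toNat) := by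
      conv_lhs => rw [← List.take_append_drop dep.toNat cs]
      rw [pvJoin_append _ _ hne1 hne2, htake]
    apply List.any_eq_true.mpr
    refine ⟨p, hp, ?_⟩
    have hsw : PySem.Str.startswith p.1 (x ++ "/") = true := by
      rw [pvSw_iff]
      exact ⟨PySem.Chars.join ['/'] (cs.drop dep.toNat), by rw [hcsj, hsplit]; simp⟩
    have hlenlt : x.toList.length < p.1.toList.length := by
      rw [hcsj, hsplit]; simp
    have hne : (p.1 == x) = false := by
      apply beq_eq_false_iff_ne.mpr
      intro he
      rw [he] at hlenlt
      omega
    rw [Bool.and_eq_true, Bool.and_eq_true]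
    exact ⟨⟨by simp [hne], hsw⟩, decide_eq_true hbig⟩
  cases ha : pvAnyDesc D.items t x with
  | true => exact (hfwd ha).symm
  | false =>
    cases hb : (pvShadow D t).contains x with
    | true => exact Bool.noConfusion ((hbwd hb).symm.trans ha)
    | false => rfl


-- ---- the common result list ----

def pvM (D : PySem.Dict String (List String)) (t : Int) : List (String × List String) :=
  D.items.filter (fun p => decide (t ≤ (p.2.length : Int)) && !pvAnyDesc D.items t p.1)

lemma pvKeys_items_nodup {D : PySem.Dict String (List String)} (hnd : D.keys.Nodup) :
    (D.items.map (fun p => p.1)).Nodup := by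
  rw [PySem.Dict.keys.eq_1] at hnd
  exact hnd

lemma pvM_map_nodup {D : PySem.Dict String (List String)} {t : Int} (hnd : D.keys.Nodup) :
    ((pvM D t).map (fun p => p.1)).Nodup :=
  (pvKeys_items_nodup hnd).sublist (List.filter_sublist.map _)

-- selected directories are pairwise non-nested
lemma pvM_pairwise (D : PySem.Dict String (List String)) (t : Int) :
    ∀ p ∈ pvM D t, ∀ q ∈ pvM D t, PySem.Str.startswith p.1 (q.1 ++ "/") = false := by
  intro p hp q hq
  cases hsw : PySem.Str.startswith p.1 (q.1 ++ "/") with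
  | false => rfl
  | true =>
    exfalso
    obtain ⟨hpmem, hpcond⟩ := List.mem_filter.mp hp
    obtain ⟨hqmem, hqcond⟩ := List.mem_filter.mp hq
    rw [Bool.and_eq_true] at hpcond hqcond
    obtain ⟨hpbig, -⟩ := hpcond
    obtain ⟨-, hqnany⟩ := hqcond
    have hpre := (pvSw_iff p.1 q.1).mp hsw
    have hlen : q.1.toList.length < p.1.toList.length := by
      have h := hpre.length_le
      rw [List.length_append, List.length_singleton] at h
      omega
    have hne : (p.1 == q.1) = false := by
      apply beq_eq_false_iff_ne.mpr
      intro he; rw [he] at hlen; omega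
    have hany : pvAnyDesc D.items t q.1 = true := by
      apply List.any_eq_true.mpr
      refine ⟨p, hpmem, ?_⟩
      rw [Bool.and_eq_true, Bool.and_eq_true]
      exact ⟨⟨by simp [hne], hsw⟩, hpbig⟩
    rw [hany] at hqnany
    simp at hqnany

-- A's third pass is the identity on a pairwise non-nested list
lemma pvPref_fold (M : List (String × List String))
    (hA : ∀ p ∈ M, ∀ q ∈ M, PySem.Str.startswith p.1 (q.1 ++ "/") = false) :
    ∀ (M₂ : List (String × List String)) (pd : PySem.Dict String (List String)),
      (∀ p ∈ M₂, p ∈ M) →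
      (∀ k ∈ pd.keys, ∃ q ∈ M, q.1 = k) →
      (pd.keys ++ M₂.map (fun p => p.1)).Nodup →
      (M₂.foldl (fun pd p =>
          if (M.any fun o => !(o.1 == p.1) && PySem.Str.startswith o.1 (p.1 ++ "/")) = true
          then pd.insert p.1 p.2
          else
            if (pd.items.any fun q => PySem.Str.startswith p.1 (q.1 ++ "/")) = true then pd
            else pd.insert p.1 p.2) pd).items = pd.items ++ M₂ := by
  intro M₂
  induction M₂ with
  | nil => intro pd _ _ _; simp
  | cons p rest ih =>
    intro pd hmem hkeys hnd
    rw [List.foldl_cons]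
    have hp : p ∈ M := hmem p (by simp)
    have hpar : (M.any fun o => !(o.1 == p.1) && PySem.Str.startswith o.1 (p.1 ++ "/")) = false := by
      apply List.any_eq_false.mpr
      intro o ho
      rw [hA o ho p hp]
      simp
    rw [hpar, if_neg (by simp)]
    have hchild : (pd.items.any fun q => PySem.Str.startswith p.1 (q.1 ++ "/")) = false := by
      apply List.any_eq_false.mpr
      intro q hq
      obtain ⟨q', hq', he⟩ := hkeys q.1 (PySem.Dict.mem_keys_of_mem_items pd hq)
      rw [← he, hA p hp q' hq']
      simp
    rw [hchild, if_neg (by simp)]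
    have hfresh : p.1 ∉ pd.keys := by
      intro hmemk
      exact (List.nodup_append.mp hnd).2.2 p.1 hmemk p.1 (by simp) rfl
    have hcon : pd.contains p.1 = false := by
      rw [Bool.eq_false_iff]
      intro hc
      exact hfresh ((PySem.Dict.contains_iff_mem_keys pd p.1).mp hc)
    rw [ih (pd.insert p.1 p.2) (fun r hr => hmem r (List.mem_cons_of_mem _ hr)) ?_ ?_]
    · rw [PySem.Dict.items_insert_of_not_contains pd p.2 hcon]
      simp
    · intro k hk
      rw [PySem.Dict.keys_insert_of_not_contains pd p.2 hcon] at hk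
      rcases List.mem_append.mp hk with h | h
      · exact hkeys k h
      · exact ⟨p, hp, (List.mem_singleton.mp h).symm⟩
    · rw [PySem.Dict.keys_insert_of_not_contains pd p.2 hcon]
      simpa [List.append_assoc] using hnd

-- ---- port A computes pvM ----

lemma pvA_as_M (cf : List String) (t : Int) :
    detect_large_added_dirs cf t = pvM (pvBuild cf) t := by
  obtain ⟨hnd, hgood⟩ := pvBuild_P cf
  simp only [detect_large_added_dirs]
  rw [show (List.foldl pvA_addDirs PySem.Dict.empty
      (List.filter (fun f => !(f == "") && !(PySem.Str.startswith f "..")) cf)) = pvBuild cf from rfl]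
  set D := pvBuild cf with hD
  have hstep : (fun (ld : PySem.Dict String (List String)) (p : String × List String) =>
      if t ≤ ((p.2).length : Int) then
        if (!(D.items.any fun o => !(o.1 == p.1) && PySem.Str.startswith o.1 (p.1 ++ "/") &&
              decide (t ≤ ((o.2).length : Int)))) = true
        then ld.insert p.1 p.2 else ld
      else ld)
      = (fun (ld : PySem.Dict String (List String)) p =>
          if (decide (t ≤ ((p.2).length : Int)) && !pvAnyDesc D.items t p.1) = true
          then ld.insert p.1 p.2 else ld) := by
    funext ld p
    by_cases hb : t ≤ ((p.2).length : Int)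
    · rw [if_pos hb]
      cases hany : pvAnyDesc D.items t p.1 with
      | false =>
        rw [show (D.items.any fun o => !(o.1 == p.1) && PySem.Str.startswith o.1 (p.1 ++ "/") &&
            decide (t ≤ ((o.2).length : Int))) = pvAnyDesc D.items t p.1 from rfl, hany]
        simp [hb]
      | true =>
        rw [show (D.items.any fun o => !(o.1 == p.1) && PySem.Str.startswith o.1 (p.1 ++ "/") &&
            decide (t ≤ ((o.2).length : Int))) = pvAnyDesc D.items t p.1 from rfl, hany]
        simp [hb]
    · rw [if_neg hb]
      simp [hb]
  rw [hstep]
  rw [show (D.items.foldl (fun (ld : PySem.Dict String (List String)) p =>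
        if (decide (t ≤ ((p.2).length : Int)) && !pvAnyDesc D.items t p.1) = true
        then ld.insert p.1 p.2 else ld) PySem.Dict.empty)
      = ((D.items.filter (fun p => decide (t ≤ ((p.2).length : Int)) && !pvAnyDesc D.items t p.1)).foldl
          (fun ld p => ld.insert p.1 p.2) PySem.Dict.empty) from
    PySem.List.foldl_if_eq_foldl_filter _ _ _ _]
  have hlarge : ((D.items.filter (fun p => decide (t ≤ ((p.2).length : Int)) && !pvAnyDesc D.items t p.1)).foldl
      (fun ld p => ld.insert p.1 p.2) PySem.Dict.empty).items = pvM D t := by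
    rw [show ((D.items.filter (fun p => decide (t ≤ ((p.2).length : Int)) && !pvAnyDesc D.items t p.1)).foldl
        (fun ld p => ld.insert p.1 p.2) PySem.Dict.empty).items
        = PySem.Dict.empty.items ++ (pvM D t).map (fun p => (p.1, p.2)) from
      PySem.Dict.items_foldl_insert_fresh _ _ _ _ (fun a _ => PySem.Dict.contains_empty _) (pvM_map_nodup hnd)]
    simp [PySem.Dict.empty]
  rw [hlarge]
  rw [show ((pvM D t).foldl (fun pd p =>
      if ((pvM D t).any fun o => !(o.1 == p.1) && PySem.Str.startswith o.1 (p.1 ++ "/")) = true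
      then pd.insert p.1 p.2
      else
        if (pd.items.any fun q => PySem.Str.startswith p.1 (q.1 ++ "/")) = true then pd
        else pd.insert p.1 p.2) PySem.Dict.empty).items = PySem.Dict.empty.items ++ pvM D t from
    pvPref_fold (pvM D t) (pvM_pairwise D t) (pvM D t) PySem.Dict.empty (fun p hp => hp)
      (by simp [PySem.Dict.keys_empty]) (by simpa [PySem.Dict.keys_empty] using pvM_map_nodup hnd)]
  simp [PySem.Dict.empty]

-- ---- port B computes pvM ----

lemma pvB_as_M (cf : List String) (t : Int) :
    detect_large_added_dirs_alt cf t = pvM (pvBuild cf) t := by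
  obtain ⟨hnd, hgood⟩ := pvBuild_P cf
  simp only [detect_large_added_dirs_alt]
  rw [pvBuildB_eq]
  set D := pvBuild cf with hD
  rw [show (((D.items.filter (fun p => decide (t ≤ ((p.2).length : Int)))).map (fun p => p.1)).foldl
      (fun s d =>
        (PySem.List.pyRange 1 ((((PySem.Str.split? d "/").getD []).length : Int) : Int)).foldl
          (fun s depth => PySem.Set.add s (PySem.Str.join "/"
            (PySem.List.slice ((PySem.Str.split? d "/").getD []) none (some depth)))) s)
      PySem.Set.empty) = pvShadow D t from rfl]
  set L0 := (D.items.filter (fun p => decide (t ≤ ((p.2).length : Int)))).map (fun p => p.1) with hL0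
  have hL0nd : L0.Nodup :=
    (pvKeys_items_nodup hnd).sublist (List.filter_sublist.map _)
  rw [show (((L0.filter (fun d => !(PySem.Set.contains (pvShadow D t) d))).foldl
      (fun out d => out.insert d (D.getD d [])) PySem.Dict.empty).items)
      = PySem.Dict.empty.items ++ (L0.filter (fun d => !(PySem.Set.contains (pvShadow D t) d))).map
          (fun d => (d, D.getD d [])) from
    PySem.Dict.items_foldl_insert_fresh _ _ _ _ (fun a _ => PySem.Dict.contains_empty _)
      (by simpa using hL0nd.sublist List.filter_sublist)]
  rw [hL0]
  rw [show ((D.items.filter (fun p => decide (t ≤ ((p.2).length : Int)))).map (fun p => p.1)).filter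
        (fun d => !(PySem.Set.contains (pvShadow D t) d))
      = ((D.items.filter (fun p => decide (t ≤ ((p.2).length : Int)))).filter
          (fun p => !(PySem.Set.contains (pvShadow D t) p.1))).map (fun p => p.1) from
    List.filter_map]
  rw [List.filter_filter]
  rw [List.map_map]
  have hgetD : ∀ p ∈ D.items.filter (fun a =>
      !(PySem.Set.contains (pvShadow D t) a.1) && decide (t ≤ ((a.2).length : Int))),
      ((fun d => (d, D.getD d [])) ∘ fun p => p.1) p = p := by
    intro p hp
    have hpi : p ∈ D.items := List.mem_of_mem_filter hp
    simp [PySem.Dict.getD_of_mem_items D hpi hnd]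
  rw [List.map_congr_left hgetD]
  have hcond : ∀ p ∈ D.items,
      (!(PySem.Set.contains (pvShadow D t) p.1) && decide (t ≤ ((p.2).length : Int)))
      = (decide (t ≤ ((p.2).length : Int)) && !pvAnyDesc D.items t p.1) := by
    intro p hp
    rw [pvAnyDesc_eq_shadow D t hgood p.1, Bool.and_comm]
  rw [List.filter_congr hcond]
  simp [pvM, PySem.Dict.empty]

-- ===== VERDICT (by name: the statement is the Claim_ definition above) =====
theorem detect_large_added_dirs_spec : Claim_equal_detect_large_added_dirs := by
  intro cf t _
  unfold Spec_detect_large_added_dirs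
  rw [pvA_as_M, pvB_as_M]
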